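-- pv_equiv track=rewrite | github.com/Lirarin/Compiladores | mainOnly.py | is_expression
-- ===== SOURCE A (Python) =====
-- SPECIAL_DIGITS = ['x', 'y', 'z', 't','w','X', 'Y', 'Z','T','W']# Conjunto de tokems atomicos passado na atividade
--
-- def is_expression(string): # checa se é expressão numérica ou não
--     for index, character in enumerate(string): # percorre cada caractere
--         if character in SPECIAL_DIGITS: # se achar um Caractere Especial
--             before = string[index - 1] if index - 1 >= 0 else None # le o digito anterior
--             after = string[index + 1] if index + 1 < len(string) else None # le o digito posterior
--             if after not in SPECIAL_DIGITS and before not in SPECIAL_DIGITS:# checa se o caractere da posição anterior também era dígito(não alternado)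
--                 return True
--     return False
-- ===== SOURCE B (Python) =====
-- SPECIAL_DIGITS = ['x', 'y', 'z', 't', 'w', 'X', 'Y', 'Z', 'T', 'W']
--
-- def is_expression(string):
--     # Scan maximal runs of special digits: an isolated special digit = a run of length 1.
--     n = len(string)
--     i = 0
--     while i < n:
--         if string[i] in SPECIAL_DIGITS:
--             j = i + 1
--             while j < n and string[j] in SPECIAL_DIGITS:
--                 j += 1
--             if j - i == 1:
--                 return True
--             i = j
--         else:
--             i += 1
--     return False
-- ===== Notes on version B (the rewrite author's own statement) =====
-- stated objective: alternative
-- what changed: B scans maximal runs of special digits and returns True iff some run has length exactly 1, instead of A's per-index check of both neighbours via indexing.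
import Mathlib
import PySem

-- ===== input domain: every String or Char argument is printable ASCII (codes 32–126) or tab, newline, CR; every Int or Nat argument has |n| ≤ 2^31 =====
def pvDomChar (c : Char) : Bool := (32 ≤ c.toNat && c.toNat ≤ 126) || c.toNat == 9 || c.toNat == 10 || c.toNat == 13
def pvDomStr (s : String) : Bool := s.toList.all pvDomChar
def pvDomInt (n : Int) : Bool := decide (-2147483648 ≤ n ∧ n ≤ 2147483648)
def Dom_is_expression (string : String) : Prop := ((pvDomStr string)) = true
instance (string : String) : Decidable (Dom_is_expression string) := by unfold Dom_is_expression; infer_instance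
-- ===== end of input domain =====

-- B replaces A's per-index two-neighbour check by a scan of maximal runs of special
-- digits (isolated special digit = run of length 1); same O(n) cost, different algorithm.

-- ===== PORT A =====
def pvSpecialDigits : List Char := ['x', 'y', 'z', 't', 'w', 'X', 'Y', 'Z', 'T', 'W']

-- membership test `c in SPECIAL_DIGITS` / `opt not in SPECIAL_DIGITS` (None is never in the list)
def pvIsSp (c : Char) : Bool := pvSpecialDigits.contains c
def pvOptNotSp : Option Char → Bool
  | none => true
  | some c => !pvIsSp c

-- the `for index, character in enumerate(string)` loop, early return = stopping the recursion
def pvLoopA (cs : List Char) : List (Int × Char) → Bool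
  | [] => false
  | (index, character) :: rest =>
    if pvIsSp character then
      let before : Option Char :=
        if index - 1 ≥ 0 then PySem.List.pyGet? cs (index - 1) else none
      let after : Option Char :=
        if index + 1 < PySem.List.len cs then PySem.List.pyGet? cs (index + 1) else none
      if pvOptNotSp after && pvOptNotSp before then true
      else pvLoopA cs rest
    else pvLoopA cs rest

def is_expression (string : String) : Bool :=
  pvLoopA string.toList (PySem.List.enumerate string.toList)

-- ===== PORT B =====
-- outer while-loop: at a special digit, the inner while-loop advances j over the run
-- (ported as takeWhile, the chars the inner loop consumes); `j - i == 1` = empty run after i.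
def pvLoopB : List Char → Bool
  | [] => false
  | c :: rest =>
    if pvIsSp c then
      let run := rest.takeWhile pvIsSp
      if run.length = 0 then true
      else pvLoopB (rest.drop run.length)
    else pvLoopB rest
termination_by cs => cs.length
decreasing_by
  · simpa using Nat.lt_succ_of_le (List.length_drop_le _ _)
  · simp

def is_expression_alt (string : String) : Bool :=
  pvLoopB string.toList

-- ===== PRECONDITION & SPEC =====
def Spec_is_expression (string : String) (out : Bool) : Prop := out = is_expression_alt string
instance (string : String) (out : Bool) : Decidable (Spec_is_expression string out) := by unfold Spec_is_expression; infer_instance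

-- ===== CLAIM (what is proved, stated in full; the proofs are below) =====
def Claim_equal_is_expression : Prop := ∀ (string : String), Dom_is_expression string → Spec_is_expression string (is_expression string)

-- ===== LEMMAS AND PROOFS =====

-- reference recursion: prev = "previous char is special", checks current char isolated
def pvHeadSp : List Char → Bool
  | [] => false
  | d :: _ => pvIsSp d

def pvChk (prev : Bool) : List Char → Bool
  | [] => false
  | c :: rest =>
    if pvIsSp c && !prev && !pvHeadSp rest then true
    else pvChk (pvIsSp c) rest

lemma pvOptNotSp_head (rest : List Char) : pvOptNotSp rest.head? = !pvHeadSp rest := by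
  cases rest <;> rfl

def pvLastSp (pre : List Char) : Bool :=
  match pre.getLast? with
  | none => false
  | some c => pvIsSp c

lemma pvOptNotSp_last (pre : List Char) : pvOptNotSp pre.getLast? = !pvLastSp pre := by
  unfold pvLastSp; cases pre.getLast? <;> rfl

lemma pvLoopA_eq_chk (pre suf : List Char) :
    pvLoopA (pre ++ suf) (PySem.List.enumerate suf (pre.length : Int)) =
      pvChk (pvLastSp pre) suf := by
  induction suf generalizing pre with
  | nil => simp [PySem.List.enumerate_nil, pvLoopA, pvChk]
  | cons c rest ih =>
    rw [PySem.List.enumerate_cons]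
    have hA : pvLoopA (pre ++ c :: rest) (((pre.length : Int), c) :: PySem.List.enumerate rest ((pre.length : Int) + 1)) =
        if pvIsSp c then
          (let before : Option Char :=
            if (pre.length : Int) - 1 ≥ 0 then PySem.List.pyGet? (pre ++ c :: rest) ((pre.length : Int) - 1) else none
          let after : Option Char :=
            if (pre.length : Int) + 1 < PySem.List.len (pre ++ c :: rest) then PySem.List.pyGet? (pre ++ c :: rest) ((pre.length : Int) + 1) else none
          if pvOptNotSp after && pvOptNotSp before then true
          else pvLoopA (pre ++ c :: rest) (PySem.List.enumerate rest ((pre.length : Int) + 1)))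
        else pvLoopA (pre ++ c :: rest) (PySem.List.enumerate rest ((pre.length : Int) + 1)) := rfl
    rw [hA]
    have hrec : pvLoopA (pre ++ c :: rest) (PySem.List.enumerate rest ((pre.length : Int) + 1)) =
        pvChk (pvIsSp c) rest := by
      have h := ih (pre ++ [c])
      simp only [List.append_assoc, List.cons_append, List.nil_append, List.length_append,
        List.length_cons, List.length_nil] at h
      have hlen : ((pre.length + 1 : Nat) : Int) = (pre.length : Int) + 1 := by push_cast; ring
      rw [hlen] at h
      rw [h]
      simp [pvLastSp]
    -- `before` is the last char of the prefix (None when the prefix is empty)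
    have hbefore : (if (pre.length : Int) - 1 ≥ 0 then PySem.List.pyGet? (pre ++ c :: rest) ((pre.length : Int) - 1) else none) =
        pre.getLast? := by
      cases pre with
      | nil => simp
      | cons p ps =>
        have hge : ((p :: ps).length : Int) - 1 ≥ 0 := by simp
        rw [if_pos hge]
        have hcast : ((p :: ps).length : Int) - 1 = (((p :: ps).length - 1 : Nat) : Int) := by
          simp
        rw [hcast, PySem.List.pyGet?_natCast]
        rw [List.getElem?_append_left (by simp), List.getLast?_eq_getElem?]
    -- `after` is the head of the rest (None at the end of the string)
    have hafter : (if (pre.length : Int) + 1 < PySem.List.len (pre ++ c :: rest) then PySem.List.pyGet? (pre ++ c :: rest) ((pre.length : Int) + 1) else none) =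
        rest.head? := by
      rw [PySem.List.len_eq]
      cases rest with
      | nil => simp
      | cons d t =>
        have hlt : (pre.length : Int) + 1 < ((pre ++ c :: d :: t).length : Int) := by
          push_cast [List.length_append, List.length_cons]; omega
        rw [if_pos hlt]
        have hr : PySem.List.pyGet? (pre ++ c :: d :: t) ((pre.length : Int) + 1) = (c :: d :: t)[(1 : Nat)]? := by
          have := PySem.List.pyGet?_append_right (pre := pre) (ys := c :: d :: t) (k := 1)
          simpa using this
        simp [hr]
    rw [hbefore, hafter, hrec]
    simp only [pvOptNotSp_head, pvOptNotSp_last]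
    rw [show pvChk (pvLastSp pre) (c :: rest) =
      (if pvIsSp c && !(pvLastSp pre) && !(pvHeadSp rest) then true else pvChk (pvIsSp c) rest) from rfl]
    cases pvIsSp c <;> cases pvHeadSp rest <;> cases pvLastSp pre <;> simp

-- B-side: after an isolated check fails, pvChk walks through the special run with prev = true
lemma pvChk_true_run (run tail : List Char) (hrun : ∀ d ∈ run, pvIsSp d = true)
    (htail : ∀ d, tail.head? = some d → pvIsSp d = false) :
    pvChk true (run ++ tail) = pvChk false tail := by
  induction run with
  | nil =>
    cases tail with
    | nil => rfl
    | cons d t => simp [pvChk, htail d rfl]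
  | cons r rs ih =>
    have hr := hrun r (by simp)
    simp [pvChk, hr, ih (fun d hd => hrun d (by simp [hd]))]

lemma pv_drop_length_takeWhile (p : Char → Bool) (l : List Char) :
    l.drop (l.takeWhile p).length = l.dropWhile p := by
  induction l with
  | nil => rfl
  | cons a t ih =>
    by_cases h : p a <;> simp [h, ih]

lemma pv_head_dropWhile (p : Char → Bool) (l : List Char) :
    ∀ d, (l.dropWhile p).head? = some d → p d = false := by
  induction l with
  | nil => intro d hd; simp at hd
  | cons a t ih =>
    intro d hd
    by_cases h : p a = true
    · simp [h] at hd
      exact ih d hd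
    · simp [h] at hd
      simp_all

lemma pvLoopB_eq_chk : ∀ (n : Nat) (cs : List Char), cs.length ≤ n → pvLoopB cs = pvChk false cs := by
  intro n
  induction n with
  | zero =>
    intro cs h
    cases cs with
    | nil => simp [pvLoopB, pvChk]
    | cons c rest => simp at h
  | succ n ih =>
    intro cs h
    cases cs with
    | nil => simp [pvLoopB, pvChk]
    | cons c rest =>
      rw [pvLoopB]
      by_cases hc : pvIsSp c = true
      · rw [if_pos hc]
        cases hr : rest.takeWhile pvIsSp with
        | nil =>
          -- isolated: no special digit follows c
          have hm : pvHeadSp rest = false := by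
            cases rest with
            | nil => rfl
            | cons d t =>
              by_cases hd : pvIsSp d = true
              · simp [hd] at hr
              · simpa [pvHeadSp] using hd
          simp [pvChk, hc, hm]
        | cons r rs =>
          -- inside a run of length ≥ 2: both sides skip to the end of the run
          have hm : pvHeadSp rest = true := by
            cases rest with
            | nil => simp [List.takeWhile_nil] at hr
            | cons d t =>
              by_cases hd : pvIsSp d = true
              · simpa [pvHeadSp] using hd
              · simp [hd] at hr
          rw [if_neg (by simp)]
          have hlen : (rest.drop (r :: rs).length).length ≤ n := by
            have h1 : rest.length ≤ n := by simpa using h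
            have h2 : (rest.drop (r :: rs).length).length = rest.length - (r :: rs).length :=
              List.length_drop
            omega
          rw [ih _ hlen]
          have hdrop : rest.drop (r :: rs).length = rest.dropWhile pvIsSp := by
            rw [← hr]; exact pv_drop_length_takeWhile pvIsSp rest
          rw [hdrop]
          have hchk : pvChk false (c :: rest) = pvChk true rest := by
            simp [pvChk, hc, hm]
          rw [hchk]
          conv_rhs => rw [← List.takeWhile_append_dropWhile (p := pvIsSp) (l := rest)]
          exact (pvChk_true_run _ _
            (fun d hd => List.mem_takeWhile_imp hd)
            (fun d hd => pv_head_dropWhile pvIsSp rest d hd)).symm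
      · rw [if_neg hc]
        have hlen : rest.length ≤ n := by simpa using h
        rw [ih _ hlen]
        have hc' : pvIsSp c = false := by simpa using hc
        simp [pvChk, hc']

-- ===== VERDICT (by name: the statement is the Claim_ definition above) =====
theorem is_expression_spec : Claim_equal_is_expression := by
  intro s _
  unfold Spec_is_expression is_expression is_expression_alt
  have h := pvLoopA_eq_chk [] s.toList
  simp only [List.nil_append, List.length_nil, Nat.cast_zero] at h
  rw [h, pvLoopB_eq_chk s.toList.length s.toList le_rfl]
  rfl
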